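-- pv_equiv track=rewrite | github.com/brk-a/DSA | 0x01_dsa/23-maximum_char_repeating_substring.py | max_char_repeating_substring_brute_force
-- ===== SOURCE A (Python) =====
-- def max_char_repeating_substring_brute_force(s: str) -> str:
--     if not isinstance(s, str) or len(s) == 0:
--         return ""
--
--     n = len(s)
--     max_count = 0
--     result = s[0]
--
--     for i in range(n):
--         counter = 0
--         for j in range(i, n):
--             if s[i] != s[j]:
--                 break
--             counter += 1
--
--         if counter > max_count:
--             max_count = counter
--             result = s[i]
--
--     return result
-- ===== SOURCE B (Python) =====
-- def max_char_repeating_substring_brute_force(s: str) -> str: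
--     if not isinstance(s, str) or len(s) == 0:
--         return ""
--     # Stage 1: run-length encode the string in one pass (update the last run in place).
--     runs = []
--     for ch in s:
--         if runs and runs[-1][0] == ch:
--             runs[-1] = (ch, runs[-1][1] + 1)
--         else:
--             runs.append((ch, 1))
--     # Stage 2: pick the first run of maximal length.
--     best_c, best_n = runs[0]
--     for c, n in runs:
--         if n > best_n:
--             best_c, best_n = c, n
--     return best_c
-- ===== Notes on version B (the rewrite author's own statement) =====
-- stated objective: faster
-- what changed: A re-counts the run from every index with nested loops (quadratic on repeat-heavy input); B first run-length-encodes the string in one pass and then scans the run list once for the first maximal run.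
import Mathlib
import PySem

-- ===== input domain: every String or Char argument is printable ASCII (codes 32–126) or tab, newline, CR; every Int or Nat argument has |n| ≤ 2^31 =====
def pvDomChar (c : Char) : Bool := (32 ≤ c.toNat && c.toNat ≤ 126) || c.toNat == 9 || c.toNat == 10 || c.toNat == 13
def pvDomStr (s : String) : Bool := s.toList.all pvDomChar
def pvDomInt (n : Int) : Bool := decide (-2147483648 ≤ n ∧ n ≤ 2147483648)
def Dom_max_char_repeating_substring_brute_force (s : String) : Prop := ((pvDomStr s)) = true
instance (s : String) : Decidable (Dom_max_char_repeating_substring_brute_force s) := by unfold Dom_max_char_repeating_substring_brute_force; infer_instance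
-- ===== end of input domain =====

-- B replaces A's per-index re-count (nested loops) by a two-stage pass — run-length encode, then pick the first maximal run; a timing run measures it faster (asymptotically O(n) vs O(n^2) on repeat-heavy input).


-- ===== PORT A =====
-- run length of the constant prefix of l equal to c (A's inner counting loop)
def pvRunLen (c : Char) : List Char → Nat
  | [] => 0
  | y :: ys => if y = c then pvRunLen c ys + 1 else 0

-- A's outer loop over every start index i (each suffix), updating on strictly greater counter
def pvALoop : List Char → Nat → Char → Nat × Char
  | [], best, res => (best, res)
  | x :: xs, best, res =>
    let counter := pvRunLen x (x :: xs)
    if counter > best then pvALoop xs counter x else pvALoop xs best res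

def max_char_repeating_substring_brute_force (s : String) : String :=
  match s.toList with
  | [] => ""
  | x :: xs => String.mk [(pvALoop (x :: xs) 0 x).2]

-- ===== PORT B =====
-- B stage 1: run-length encoding, one left-to-right pass; Python appends/updates the LAST
-- run, so the accumulator here holds the runs in reverse (head = last run) and is reversed at the end.
def pvRLEStep (acc : List (Char × Nat)) (ch : Char) : List (Char × Nat) :=
  match acc with
  | (c, n) :: rest => if c == ch then (c, n + 1) :: rest else (ch, 1) :: (c, n) :: rest
  | [] => [(ch, 1)]

-- B stage 2: first run of maximal length (strictly-greater update)
def pvPickStep (b : Char × Nat) (r : Char × Nat) : Char × Nat :=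
  if r.2 > b.2 then r else b

def max_char_repeating_substring_brute_force_alt (s : String) : String :=
  match (s.toList.foldl pvRLEStep []).reverse with
  | [] => ""
  | r0 :: rs => String.mk [((r0 :: rs).foldl pvPickStep r0).1]

-- ===== PRECONDITION & SPEC =====
def Spec_max_char_repeating_substring_brute_force (s : String) (out : String) : Prop := out = max_char_repeating_substring_brute_force_alt s
instance (s : String) (out : String) : Decidable (Spec_max_char_repeating_substring_brute_force s out) := by unfold Spec_max_char_repeating_substring_brute_force; infer_instance

-- ===== CLAIM (what is proved, stated in full; the proofs are below) =====
def Claim_equal_max_char_repeating_substring_brute_force : Prop := ∀ (s : String), Dom_max_char_repeating_substring_brute_force s → Spec_max_char_repeating_substring_brute_force s (max_char_repeating_substring_brute_force s)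

-- ===== LEMMAS AND PROOFS =====

-- canonical front-grouping run-length encoding, used to relate the two programs
def pvFrontRuns : List Char → List (Char × Nat)
  | [] => []
  | x :: xs => (x, pvRunLen x xs + 1) :: pvFrontRuns (xs.drop (pvRunLen x xs))
termination_by l => l.length
decreasing_by
  simp only [List.length_drop, List.length_cons]
  omega

-- within a run whose remaining length is already ≤ best, A's loop makes no update
theorem pvALoop_skip (x : Char) : ∀ (xs : List Char) (best : Nat) (res : Char),
    pvRunLen x xs ≤ best →
    pvALoop xs best res = pvALoop (xs.drop (pvRunLen x xs)) best res := by
  intro xs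
  induction xs with
  | nil => intro best res _; simp
  | cons y ys ih =>
    intro best res h
    by_cases hyx : y = x
    · subst hyx
      have h' : pvRunLen y ys + 1 ≤ best := by simpa [pvRunLen] using h
      have hcnt : pvRunLen y (y :: ys) = pvRunLen y ys + 1 := by simp [pvRunLen]
      have hstep : pvALoop (y :: ys) best res = pvALoop ys best res := by
        simp only [pvALoop, hcnt]
        rw [if_neg (by omega)]
      rw [hstep, ih best res (by omega)]
      simp [pvRunLen]
    · simp [pvRunLen, hyx]

-- A's outer loop is the strictly-greater fold over the canonical runs (Nat × Char order)
theorem pvALoop_eq_foldRuns : ∀ (n : Nat) (l : List Char) (best : Nat) (res : Char),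
    l.length ≤ n →
    pvALoop l best res =
      (pvFrontRuns l).foldl (fun b r => if r.2 > b.1 then (r.2, r.1) else b) (best, res) := by
  intro n
  induction n with
  | zero =>
    intro l best res h
    have : l = [] := List.eq_nil_of_length_eq_zero (Nat.le_zero.mp h)
    subst this; simp [pvALoop, pvFrontRuns]
  | succ m ih =>
    intro l best res h
    cases l with
    | nil => simp [pvALoop, pvFrontRuns]
    | cons x xs =>
      have hcnt : pvRunLen x (x :: xs) = pvRunLen x xs + 1 := by simp [pvRunLen]
      have hlen : (xs.drop (pvRunLen x xs)).length ≤ m := by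
        simp only [List.length_drop]; simp at h; omega
      rw [pvFrontRuns]
      simp only [pvALoop, hcnt, List.foldl_cons]
      by_cases hgt : pvRunLen x xs + 1 > best
      · rw [if_pos hgt, if_pos hgt, pvALoop_skip x xs _ _ (by omega), ih _ _ _ hlen]
      · rw [if_neg hgt, if_neg hgt, pvALoop_skip x xs _ _ (by omega), ih _ _ _ hlen]

-- B's reversed-accumulator fold computes the canonical runs (reversed), given the
-- accumulator's head run does not continue into the list
theorem pvRLE_run_absorb (x : Char) : ∀ (xs : List Char) (n : Nat) (acc : List (Char × Nat)),
    List.foldl pvRLEStep ((x, n) :: acc) xs =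
      List.foldl pvRLEStep ((x, n + pvRunLen x xs) :: acc) (xs.drop (pvRunLen x xs)) := by
  intro xs
  induction xs with
  | nil => intro n acc; simp [pvRunLen]
  | cons y ys ih =>
    intro n acc
    by_cases hyx : y = x
    · subst hyx
      simp only [pvRunLen, List.foldl_cons, pvRLEStep, beq_self_eq_true, if_pos]
      rw [ih (n + 1) acc]
      have : n + 1 + pvRunLen y ys = n + (pvRunLen y ys + 1) := by omega
      rw [this]
      simp
    · simp [pvRunLen, hyx]

theorem pvRunLen_drop_head (x : Char) : ∀ (xs : List Char),
    ∀ c cs, xs.drop (pvRunLen x xs) = c :: cs → c ≠ x := by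
  intro xs
  induction xs with
  | nil => intro c cs h; simp at h
  | cons y ys ih =>
    intro c cs h
    by_cases hyx : y = x
    · subst hyx
      have h' : List.drop (pvRunLen y ys) ys = c :: cs := by
        simpa [pvRunLen, List.drop_succ_cons] using h
      exact ih c cs h'
    · simp [pvRunLen, hyx] at h
      rcases h with ⟨h1, _⟩
      subst h1; exact hyx

-- the accumulator's head char differs from the list's head char ⇒ the fold appends the canonical runs
theorem pvRLE_eq_frontRuns : ∀ (n : Nat) (l : List Char) (acc : List (Char × Nat)),
    l.length ≤ n →
    (acc = [] ∨ ∀ c k rest x xs, acc = (c, k) :: rest → l = x :: xs → c ≠ x) →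
    List.foldl pvRLEStep acc l = (pvFrontRuns l).reverse ++ acc := by
  intro n
  induction n with
  | zero =>
    intro l acc h _
    have : l = [] := List.eq_nil_of_length_eq_zero (Nat.le_zero.mp h)
    subst this; simp [pvFrontRuns]
  | succ m ih =>
    intro l acc h hok
    cases l with
    | nil => simp [pvFrontRuns]
    | cons x xs =>
      have hstep : pvRLEStep acc x = (x, 1) :: acc := by
        cases acc with
        | nil => simp [pvRLEStep]
        | cons p rest =>
          obtain ⟨c, k⟩ := p
          have hne : c ≠ x := by
            rcases hok with h0 | hf
            · exact absurd h0 (by simp)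
            · exact hf c k rest x xs rfl rfl
          simp [pvRLEStep, hne]
      rw [List.foldl_cons, hstep, pvRLE_run_absorb x xs 1 acc]
      have hlen : (xs.drop (pvRunLen x xs)).length ≤ m := by
        simp only [List.length_drop]; simp at h; omega
      have hok' : ((x, 1 + pvRunLen x xs) :: acc) = ([] : List (Char × Nat)) ∨
          ∀ c k rest y ys, ((x, 1 + pvRunLen x xs) :: acc) = (c, k) :: rest →
            (xs.drop (pvRunLen x xs)) = y :: ys → c ≠ y := by
        right
        intro c k rest y ys hacc hl
        have hcx : c = x := by
          have := congrArg (fun l => (l.headI : Char × Nat).1) hacc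
          simpa using this.symm
        subst hcx
        exact fun hcy => pvRunLen_drop_head c xs y ys hl (hcy.symm ▸ rfl)
      rw [ih _ _ hlen hok']
      rw [pvFrontRuns]
      have : 1 + pvRunLen x xs = pvRunLen x xs + 1 := by omega
      rw [this]
      simp

-- the two strictly-greater selection folds mirror each other (pair components swapped)
theorem pvFolds_mirror : ∀ (rs : List (Char × Nat)) (n : Nat) (c : Char),
    ((rs.foldl (fun b r => if r.2 > b.1 then (r.2, r.1) else b) ((n, c) : Nat × Char)).2) =
      ((rs.foldl pvPickStep ((c, n) : Char × Nat)).1) := by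
  intro rs
  induction rs with
  | nil => intro n c; simp
  | cons r rest ih =>
    intro n c
    obtain ⟨rc, rn⟩ := r
    simp only [List.foldl_cons, pvPickStep]
    by_cases hgt : rn > n
    · rw [if_pos hgt, if_pos hgt]; exact ih rn rc
    · rw [if_neg hgt, if_neg hgt]; exact ih n c

-- ===== VERDICT (by name: the statement is the Claim_ definition above) =====
theorem max_char_repeating_substring_brute_force_spec : Claim_equal_max_char_repeating_substring_brute_force := by
  intro s _
  unfold Spec_max_char_repeating_substring_brute_force
  unfold max_char_repeating_substring_brute_force max_char_repeating_substring_brute_force_alt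
  have hRLE := pvRLE_eq_frontRuns (s.toList.length) s.toList [] le_rfl (Or.inl rfl)
  cases hl : s.toList with
  | nil => rw [hl] at hRLE; simp [hRLE, pvFrontRuns]
  | cons x xs =>
    rw [hl] at hRLE
    rw [hRLE]
    simp only [List.append_nil, List.reverse_reverse]
    rw [pvFrontRuns]
    have hA := pvALoop_eq_foldRuns (x :: xs).length (x :: xs) 0 x le_rfl
    rw [hA, pvFrontRuns]
    simp only [List.foldl_cons]
    rw [if_pos (by omega : pvRunLen x xs + 1 > 0)]
    have hB : pvPickStep (x, pvRunLen x xs + 1) (x, pvRunLen x xs + 1) = (x, pvRunLen x xs + 1) := by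
      simp [pvPickStep]
    rw [hB]
    exact congrArg (fun c => String.mk [c])
      (pvFolds_mirror (pvFrontRuns (xs.drop (pvRunLen x xs))) (pvRunLen x xs + 1) x)
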